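-- pv_equiv track=rewrite | github.com/jzmtx/ascent-path | ascent-path-backend/roles/views.py | get_job_count_for_tags
-- ===== SOURCE A (Python) =====
-- def get_job_count_for_tags(tags: list, jobs: list) -> int:
--     """Count jobs that match any of the given tags."""
--     tags_lower = {t.lower() for t in tags}
--     count = 0
--     for job in jobs:
--         job_tags = {t.lower() for t in job.get('tags', [])}
--         if tags_lower & job_tags:  # intersection
--             count += 1
--     return count
-- ===== SOURCE B (Python) =====
-- def get_job_count_for_tags(tags: list, jobs: list) -> int:
--     """Count jobs that match any of the given tags."""
--     index = {}
--     for i, job in enumerate(jobs):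
--         for t in job.get('tags', []):
--             index.setdefault(t.lower(), set()).add(i)
--     matched = set()
--     for t in tags:
--         matched |= index.get(t.lower(), set())
--     return len(matched)
-- ===== Notes on version B (the rewrite author's own statement) =====
-- stated objective: alternative
-- what changed: Replaces the per-job set-intersection loop by an inverted index (tag -> set of job positions) built once over enumerate(jobs), answered by unioning the index entries of the lowered query tags and returning the size of the union.
import Mathlib
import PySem

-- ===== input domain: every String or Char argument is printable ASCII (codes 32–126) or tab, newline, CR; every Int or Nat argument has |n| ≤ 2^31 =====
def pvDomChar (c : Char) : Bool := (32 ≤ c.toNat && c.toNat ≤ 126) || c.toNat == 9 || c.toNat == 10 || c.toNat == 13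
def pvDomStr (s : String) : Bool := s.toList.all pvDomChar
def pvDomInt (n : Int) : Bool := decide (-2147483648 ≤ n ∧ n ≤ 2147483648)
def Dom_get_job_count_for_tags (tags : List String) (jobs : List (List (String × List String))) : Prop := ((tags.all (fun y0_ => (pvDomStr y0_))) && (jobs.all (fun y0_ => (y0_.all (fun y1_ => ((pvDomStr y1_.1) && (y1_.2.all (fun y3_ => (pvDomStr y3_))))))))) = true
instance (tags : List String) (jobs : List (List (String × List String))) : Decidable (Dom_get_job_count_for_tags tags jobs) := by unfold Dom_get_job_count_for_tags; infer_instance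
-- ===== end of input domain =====

-- B replaces A's per-job set-intersection scan by an inverted index tag -> set of job
-- positions, answered by a union over the query tags (alternative decomposition, same cost).

-- ===== PORT A =====
def get_job_count_for_tags (tags : List String) (jobs : List (List (String × List String))) : Int :=
  let tagsLower : PySem.Set String := PySem.Set.ofList (tags.map (fun t => PySem.Str.lower t))
  jobs.foldl (fun count job =>
    let jobTags : PySem.Set String :=
      PySem.Set.ofList (((PySem.Dict.mk job).getD "tags" []).map (fun t => PySem.Str.lower t))
    if PySem.Set.inter tagsLower jobTags ≠ [] then count + 1 else count) 0

-- ===== PORT B =====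
def get_job_count_for_tags_alt (tags : List String) (jobs : List (List (String × List String))) : Int :=
  let index : PySem.Dict String (PySem.Set Int) :=
    (PySem.List.enumerate jobs).foldl (fun d p =>
      ((PySem.Dict.mk p.2).getD "tags" []).foldl
        (fun d t => d.modify (PySem.Str.lower t) [] (fun s => PySem.Set.add s p.1)) d)
      PySem.Dict.empty
  let matched : PySem.Set Int :=
    tags.foldl (fun m t => PySem.Set.union m (index.getD (PySem.Str.lower t) [])) PySem.Set.empty
  (matched.length : Int)

-- ===== PRECONDITION & SPEC =====
def Spec_get_job_count_for_tags (tags : List String) (jobs : List (List (String × List String))) (out : Int) : Prop := out = get_job_count_for_tags_alt tags jobs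
instance (tags : List String) (jobs : List (List (String × List String))) (out : Int) : Decidable (Spec_get_job_count_for_tags tags jobs out) := by unfold Spec_get_job_count_for_tags; infer_instance

-- ===== CLAIM (what is proved, stated in full; the proofs are below) =====
def Claim_equal_get_job_count_for_tags : Prop := ∀ (tags : List String) (jobs : List (List (String × List String))), Dom_get_job_count_for_tags tags jobs → Spec_get_job_count_for_tags tags jobs (get_job_count_for_tags tags jobs)

-- ===== LEMMAS AND PROOFS =====

-- lowered tag list of one job
def pvL (job : List (String × List String)) : List String :=
  ((PySem.Dict.mk job).getD "tags" []).map (fun t => PySem.Str.lower t)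

-- the boolean "job matches some query tag"
def pvP (tags : List String) (job : List (String × List String)) : Bool :=
  decide (∃ t ∈ tags, PySem.Str.lower t ∈ pvL job)

theorem pv_ne_nil_iff {α : Type} (l : List α) : l ≠ [] ↔ ∃ x, x ∈ l := by
  cases l <;> simp

-- A's counting fold equals countP
theorem pv_foldl_count {α : Type} (p : α → Bool) (l : List α) (c : Int) :
    l.foldl (fun c x => if p x then c + 1 else c) c = c + l.countP p := by
  induction l generalizing c with
  | nil => simp
  | cons x xs ih =>
    by_cases h : p x = true
    · simp [List.foldl_cons, h, ih]; ring
    · simp [List.foldl_cons, h, ih]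

theorem pv_A_eq (tags : List String) (jobs : List (List (String × List String))) :
    get_job_count_for_tags tags jobs = (jobs.countP (pvP tags) : Int) := by
  unfold get_job_count_for_tags
  have hcond : ∀ job, (PySem.Set.inter (PySem.Set.ofList (tags.map (fun t => PySem.Str.lower t)))
      (PySem.Set.ofList (pvL job)) ≠ []) ↔ pvP tags job = true := by
    intro job
    constructor
    · intro h
      obtain ⟨x, hx⟩ := (pv_ne_nil_iff _).mp h
      rw [PySem.Set.mem_inter, PySem.Set.mem_ofList, PySem.Set.mem_ofList] at hx
      obtain ⟨hx1, hx2⟩ := hx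
      obtain ⟨t, ht, rfl⟩ := List.mem_map.mp hx1
      simp only [pvP, decide_eq_true_iff]
      exact ⟨t, ht, hx2⟩
    · intro h
      simp only [pvP, decide_eq_true_iff] at h
      obtain ⟨t, ht, hmem⟩ := h
      apply (pv_ne_nil_iff _).mpr
      exact ⟨PySem.Str.lower t, by
        rw [PySem.Set.mem_inter, PySem.Set.mem_ofList, PySem.Set.mem_ofList]
        exact ⟨List.mem_map.mpr ⟨t, ht, rfl⟩, hmem⟩⟩
  simp only [pvL] at hcond
  have : ∀ (c : Int), jobs.foldl (fun count job =>
      if PySem.Set.inter (PySem.Set.ofList (tags.map (fun t => PySem.Str.lower t)))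
        (PySem.Set.ofList (((PySem.Dict.mk job).getD "tags" []).map (fun t => PySem.Str.lower t))) ≠ []
      then count + 1 else count) c = c + jobs.countP (pvP tags) := by
    intro c
    rw [← pv_foldl_count (pvP tags) jobs c]
    apply PySem.List.foldl_congr_mem
    intro a b hb
    by_cases h : pvP tags b = true
    · rw [if_pos ((hcond b).mpr h), if_pos h]
    · rw [if_neg (fun hc => h ((hcond b).mp hc)), if_neg h]
  simpa using this 0

-- inner loop of B: membership in an index entry after scanning one job's tags
theorem pv_inner_mem (ts : List String) (d : PySem.Dict String (PySem.Set Int)) (i : Int)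
    (key : String) (j : Int) :
    j ∈ (ts.foldl (fun d t => d.modify (PySem.Str.lower t) [] (fun s => PySem.Set.add s i)) d).getD key []
      ↔ j ∈ d.getD key [] ∨ (j = i ∧ key ∈ ts.map (fun t => PySem.Str.lower t)) := by
  induction ts generalizing d with
  | nil => simp
  | cons t ts ih =>
    simp only [List.foldl_cons, ih, PySem.Dict.getD_modify, List.map_cons, List.mem_cons]
    by_cases h : key = PySem.Str.lower t
    · subst h; simp [PySem.Set.mem_add]; tauto
    · rw [if_neg h]; constructor
      · rintro (h1 | ⟨rfl, h2⟩)
        · exact Or.inl h1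
        · exact Or.inr ⟨rfl, Or.inr h2⟩
      · rintro (h1 | ⟨rfl, (h2 | h2)⟩)
        · exact Or.inl h1
        · exact absurd h2 h
        · exact Or.inr ⟨rfl, h2⟩

-- outer loop of B: membership in an index entry after scanning all jobs
theorem pv_index_mem (jobs : List (List (String × List String)))
    (d : PySem.Dict String (PySem.Set Int)) (s0 : Int) (key : String) (j : Int) :
    j ∈ ((PySem.List.enumerate jobs s0).foldl (fun d p =>
        ((PySem.Dict.mk p.2).getD "tags" []).foldl
          (fun d t => d.modify (PySem.Str.lower t) [] (fun s => PySem.Set.add s p.1)) d) d).getD key []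
      ↔ j ∈ d.getD key [] ∨ ∃ k : Nat, ∃ h : k < jobs.length, j = s0 + k ∧ key ∈ pvL jobs[k] := by
  induction jobs generalizing d s0 with
  | nil => simp [PySem.List.enumerate]
  | cons job jobs ih =>
    rw [PySem.List.enumerate_cons]
    simp only [List.foldl_cons, ih, pv_inner_mem]
    constructor
    · rintro ((h1 | ⟨rfl, h2⟩) | ⟨k, hk, rfl, h3⟩)
      · exact Or.inl h1
      · exact Or.inr ⟨0, by simp, by simp, by simpa [pvL] using h2⟩
      · refine Or.inr ⟨k + 1, by simp; omega, ?_, by simpa using h3⟩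
        push_cast; ring
    · rintro (h1 | ⟨k, hk, rfl, h3⟩)
      · exact Or.inl (Or.inl h1)
      · cases k with
        | zero => exact Or.inl (Or.inr ⟨by simp, by simpa [pvL] using h3⟩)
        | succ k =>
          refine Or.inr ⟨k, by simpa using Nat.lt_of_succ_lt_succ (by simpa using hk), ?_, by simpa using h3⟩
          push_cast; ring

-- union loop of B: membership in matched
theorem pv_matched_mem (tags : List String) (index : PySem.Dict String (PySem.Set Int))
    (m : PySem.Set Int) (j : Int) :
    j ∈ tags.foldl (fun m t => PySem.Set.union m (index.getD (PySem.Str.lower t) [])) m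
      ↔ j ∈ m ∨ ∃ t ∈ tags, j ∈ index.getD (PySem.Str.lower t) [] := by
  induction tags generalizing m with
  | nil => simp
  | cons t ts ih =>
    simp only [List.foldl_cons, ih, PySem.Set.mem_union, List.mem_cons]
    constructor
    · rintro ((h1 | h2) | ⟨t', ht', hj⟩)
      · exact Or.inl h1
      · exact Or.inr ⟨t, Or.inl rfl, h2⟩
      · exact Or.inr ⟨t', Or.inr ht', hj⟩
    · rintro (h1 | ⟨t', ht' | ht', hj⟩)
      · exact Or.inl (Or.inl h1)
      · subst ht'; exact Or.inl (Or.inr hj)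
      · exact Or.inr ⟨t', ht', hj⟩

theorem pv_matched_nodup (tags : List String) (index : PySem.Dict String (PySem.Set Int))
    (m : PySem.Set Int) (h : m.Nodup) :
    (tags.foldl (fun m t => PySem.Set.union m (index.getD (PySem.Str.lower t) [])) m).Nodup := by
  induction tags generalizing m with
  | nil => exact h
  | cons t ts ih =>
    rw [List.foldl_cons]
    exact ih _ (PySem.Set.nodup_union _ _ h)

-- the inverted index B builds (proof-only abbreviation of B's first loop)
def pvIndex (jobs : List (List (String × List String))) : PySem.Dict String (PySem.Set Int) :=
  (PySem.List.enumerate jobs).foldl (fun d p =>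
    ((PySem.Dict.mk p.2).getD "tags" []).foldl
      (fun d t => d.modify (PySem.Str.lower t) [] (fun s => PySem.Set.add s p.1)) d)
    PySem.Dict.empty

theorem pv_B_eq (tags : List String) (jobs : List (List (String × List String))) :
    get_job_count_for_tags_alt tags jobs = (jobs.countP (pvP tags) : Int) := by
  have hBdef : get_job_count_for_tags_alt tags jobs =
      ((tags.foldl (fun m t => PySem.Set.union m ((pvIndex jobs).getD (PySem.Str.lower t) []))
        PySem.Set.empty).length : Int) := rfl
  rw [hBdef]
  set matched : PySem.Set Int :=
    tags.foldl (fun m t => PySem.Set.union m ((pvIndex jobs).getD (PySem.Str.lower t) []))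
      PySem.Set.empty with hmatched
  set R : List Int := ((PySem.List.enumerate jobs).filter (fun p => pvP tags p.2)).map (·.1) with hR
  have hmem : ∀ j : Int, j ∈ matched ↔ j ∈ R := by
    intro j
    rw [hmatched, pv_matched_mem]
    simp only [PySem.Set.empty, List.not_mem_nil, false_or]
    constructor
    · rintro ⟨t, ht, hj⟩
      rw [pvIndex, pv_index_mem] at hj
      rcases hj with h | ⟨k, hk, rfl, hkey⟩
      · simp [PySem.Dict.getD_empty] at h
      · rw [hR]
        apply List.mem_map.mpr
        refine ⟨((0 : Int) + k, jobs[k]), List.mem_filter.mpr ⟨?_, ?_⟩, rfl⟩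
        · exact (PySem.List.mem_enumerate_iff _ _ _).mpr ⟨k, hk, rfl⟩
        · simp only [pvP, decide_eq_true_iff]
          exact ⟨t, ht, hkey⟩
    · intro hj
      rw [hR] at hj
      obtain ⟨p, hp, rfl⟩ := List.mem_map.mp hj
      obtain ⟨hpe, hppred⟩ := List.mem_filter.mp hp
      obtain ⟨k, hk, rfl⟩ := (PySem.List.mem_enumerate_iff _ _ _).mp hpe
      simp only [pvP, decide_eq_true_iff] at hppred
      obtain ⟨t, ht, hkey⟩ := hppred
      refine ⟨t, ht, ?_⟩
      rw [pvIndex, pv_index_mem]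
      exact Or.inr ⟨k, hk, rfl, hkey⟩
  have hnodupM : matched.Nodup := pv_matched_nodup _ _ _ List.nodup_nil
  have hnodupR : R.Nodup := by
    rw [hR]
    have hpw : ((PySem.List.enumerate jobs).filter (fun p => pvP tags p.2)).Pairwise
        (fun p q => p.1 < q.1) :=
      (PySem.List.pairwise_lt_enumerate jobs 0).sublist List.filter_sublist
    refine List.Pairwise.map _ ?_ hpw
    intro a b h
    exact Int.ne_of_lt h
  have hperm : matched.Perm R := (List.perm_ext_iff_of_nodup hnodupM hnodupR).mpr hmem
  rw [hperm.length_eq, hR, List.length_map]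
  have hc : (List.filter (fun p => pvP tags p.2) (PySem.List.enumerate jobs)).length
      = jobs.countP (pvP tags) := by
    rw [← List.countP_eq_length_filter]
    conv_rhs => rw [← PySem.List.map_snd_enumerate jobs 0, List.countP_map]
    rfl
  rw [hc]

-- ===== VERDICT (by name: the statement is the Claim_ definition above) =====
theorem get_job_count_for_tags_spec : Claim_equal_get_job_count_for_tags := by
  intro tags jobs _
  show get_job_count_for_tags tags jobs = get_job_count_for_tags_alt tags jobs
  rw [pv_A_eq, pv_B_eq]
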